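-- pv_equiv track=rewrite | github.com/nagatakouichi/Python_PuzzleRPG | PuzzleRPG/gemManager.py | check_banishable
-- ===== SOURCE A (Python) =====
-- def check_banishable(gems_slot):
--     slot_num = 0
--     consecutive_gems = list()
--
--     for gem in gems_slot :
--         if len(consecutive_gems) <= 0 :
--             consecutive_gems.append(gem)
--         else:
--             if gem == consecutive_gems[0] :
--                 consecutive_gems.append(gem)
--             else:
--                 if len(consecutive_gems) >= 3 :
--                     break
--                 else:
--                     consecutive_gems = list()
--                     consecutive_gems.append(gem)
--         slot_num += 1
--
--     banishable_slot = list()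
--     if len(consecutive_gems) >= 3 and consecutive_gems[0] != 5 :
--         banishable_slot = range(slot_num - len(consecutive_gems), slot_num)
--     return banishable_slot
-- ===== SOURCE B (Python) =====
-- def check_banishable(gems_slot):
--     # Phase 1: run-length encode the slots in one pass.
--     runs = []
--     current = None
--     count = 0
--     for gem in gems_slot:
--         if count > 0 and gem == current:
--             count += 1
--         else:
--             if count > 0:
--                 runs.append((current, count))
--             current, count = gem, 1
--     if count > 0:
--         runs.append((current, count))
--     # Phase 2: scan the runs; the FIRST run of length >= 3 decides.
--     start = 0
--     for value, length in runs:
--         if length >= 3: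
--             if value != 5:
--                 return range(start, start + length)
--             return []
--         start += length
--     return []
-- ===== Notes on version B (the rewrite author's own statement) =====
-- stated objective: alternative
-- what changed: B splits the work into two phases: it first run-length-encodes the slot list into (value,count) pairs, then scans those runs with a running start index and lets the first run of length >= 3 decide, instead of A's single loop that grows/resets a materialized run list and breaks out mid-iteration.
import Mathlib
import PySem

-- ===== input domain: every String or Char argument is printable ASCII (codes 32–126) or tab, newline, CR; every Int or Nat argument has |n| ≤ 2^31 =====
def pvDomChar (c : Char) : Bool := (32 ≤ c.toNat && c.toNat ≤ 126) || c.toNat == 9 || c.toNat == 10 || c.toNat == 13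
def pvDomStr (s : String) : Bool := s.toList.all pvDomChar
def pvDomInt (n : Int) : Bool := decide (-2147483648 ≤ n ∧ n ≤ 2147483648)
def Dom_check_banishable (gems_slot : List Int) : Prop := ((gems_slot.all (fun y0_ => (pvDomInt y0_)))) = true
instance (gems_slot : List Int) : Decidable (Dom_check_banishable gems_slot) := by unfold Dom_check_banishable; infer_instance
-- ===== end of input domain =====

-- B restructures A's single break-out loop into two phases (run-length encode, then scan the runs); same cost, alternative decomposition. Equivalence of return values is proved below.

-- ===== PORT A =====
-- A's for-loop with `break`: structural recursion over the remaining gems,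
-- state = (slot_num, consecutive_gems); returning the state = `break`/loop end.
-- `consecutive_gems[0]` is read only under `len > 0`, so headI is exact there.
def checkGoA : List Int → Int → List Int → Int × List Int
  | [], slot_num, consecutive_gems => (slot_num, consecutive_gems)
  | gem :: rest, slot_num, consecutive_gems =>
    if consecutive_gems.length ≤ 0 then
      checkGoA rest (slot_num + 1) (consecutive_gems ++ [gem])
    else if gem = consecutive_gems.headI then
      checkGoA rest (slot_num + 1) (consecutive_gems ++ [gem])
    else if 3 ≤ consecutive_gems.length then
      (slot_num, consecutive_gems)
    else
      checkGoA rest (slot_num + 1) [gem]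

def check_banishable (gems_slot : List Int) : List Int :=
  let st := checkGoA gems_slot 0 []
  let slot_num := st.1
  let consecutive_gems := st.2
  if 3 ≤ consecutive_gems.length ∧ consecutive_gems.headI ≠ 5 then
    PySem.List.pyRange (slot_num - consecutive_gems.length) slot_num 1
  else []

-- ===== PORT B =====
-- Phase 1 of Source B: one foldl building the run-length encoding;
-- state = (runs, current, count), `current = None` ↦ none, `count = 0` before first gem.
def rleStepB (st : List (Int × Int) × Option Int × Int) (gem : Int) :
    List (Int × Int) × Option Int × Int :=
  let (runs, current, count) := st
  if 0 < count ∧ some gem = current then (runs, current, count + 1)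
  else
    let runs' := if 0 < count then runs ++ [(current.getD 0, count)] else runs
    (runs', some gem, 1)

def rleFlushB (st : List (Int × Int) × Option Int × Int) : List (Int × Int) :=
  let (runs, current, count) := st
  if 0 < count then runs ++ [(current.getD 0, count)] else runs

-- Phase 2 of Source B: scan the runs with a running start; first run of length ≥ 3 decides.
def scanRunsB : List (Int × Int) → Int → List Int
  | [], _ => []
  | (value, length) :: rest, start =>
    if 3 ≤ length then
      if value ≠ 5 then PySem.List.pyRange start (start + length) 1 else []
    else scanRunsB rest (start + length)

def check_banishable_alt (gems_slot : List Int) : List Int :=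
  let runs := rleFlushB (gems_slot.foldl rleStepB ([], none, 0))
  scanRunsB runs 0

-- ===== PRECONDITION & SPEC =====
def Spec_check_banishable (gems_slot : List Int) (out : List Int) : Prop := out = check_banishable_alt gems_slot
instance (gems_slot : List Int) (out : List Int) : Decidable (Spec_check_banishable gems_slot out) := by unfold Spec_check_banishable; infer_instance

-- ===== CLAIM (what is proved, stated in full; the proofs are below) =====
def Claim_equal_check_banishable : Prop := ∀ (gems_slot : List Int), Dom_check_banishable gems_slot → Spec_check_banishable gems_slot (check_banishable gems_slot)

-- ===== LEMMAS AND PROOFS =====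

-- B's flushed fold from a live state (some v, n) with n > 0 just appends to runs.
theorem rle_append (gems : List Int) : ∀ (runs : List (Int × Int)) (v : Int) (n : Int),
    0 < n →
    rleFlushB (gems.foldl rleStepB (runs, some v, n))
      = runs ++ rleFlushB (gems.foldl rleStepB ([], some v, n)) := by
  induction gems with
  | nil =>
    intro runs v n hn
    simp [rleFlushB, hn]
  | cons g rest ih =>
    intro runs v n hn
    by_cases hg : g = v
    · subst hg
      simp only [List.foldl_cons, rleStepB, hn, true_and, if_pos rfl]
      exact ih runs g (n + 1) (by omega)
    · have hne : ¬ (0 < n ∧ some g = some v) := by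
        rintro ⟨-, h⟩; exact hg (Option.some.inj h)
      simp only [List.foldl_cons, rleStepB, hne, if_false, if_pos hn, Option.getD_some, List.nil_append]
      rw [ih (runs ++ [(v, n)]) g 1 (by omega), ih [(v, n)] g 1 (by omega)]
      simp

-- A's finishing computation from a final state.
def finishA (st : Int × List Int) : List Int :=
  if 3 ≤ st.2.length ∧ st.2.headI ≠ 5 then
    PySem.List.pyRange (st.1 - st.2.length) st.1 1
  else []

-- Main invariant: A's loop from a live run of n copies of v at position slot_num
-- computes the same value as B's scan of the RLE of the remaining gems seeded
-- with the live run, started at slot_num - n.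
theorem main_inv (gems : List Int) : ∀ (v : Int) (n : Nat) (slot_num : Int),
    1 ≤ n →
    finishA (checkGoA gems slot_num (List.replicate n v))
      = scanRunsB (rleFlushB (gems.foldl rleStepB ([], some v, (n : Int)))) (slot_num - n) := by
  induction gems with
  | nil =>
    intro v n slot_num hn
    have hpos : (0 : Int) < n := by exact_mod_cast hn
    simp only [checkGoA, List.foldl_nil, rleFlushB, if_pos hpos, List.nil_append,
      Option.getD_some, finishA, List.length_replicate]
    by_cases h3 : 3 ≤ (n : Int)
    · have h3n : 3 ≤ n := by exact_mod_cast h3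
      have hh : (List.replicate n v).headI = v := by
        cases n with
        | zero => omega
        | succ m => simp [List.replicate_succ]
      by_cases h5 : v = 5
      · simp [scanRunsB, h3, h5, hh, h3n]
        simp only [h5] at hh
        exact fun hcon => absurd hh hcon
      · have : slot_num - (n : Int) + (n : Int) = slot_num := by ring
        simp [scanRunsB, h3, h5, hh, h3n, this]
    · have h3n : ¬ 3 ≤ n := by omega
      simp [scanRunsB, h3, h3n]
  | cons g rest ih =>
    intro v n slot_num hn
    have hpos : (0 : Int) < n := by exact_mod_cast hn
    have hlen : ¬ (List.replicate n v).length ≤ 0 := by simp; omega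
    have hh : (List.replicate n v).headI = v := by
      cases n with
      | zero => omega
      | succ m => simp [List.replicate_succ]
    by_cases hg : g = v
    · subst hg
      have hrep : List.replicate n g ++ [g] = List.replicate (n + 1) g := by
        simp [List.replicate_succ']
      simp only [checkGoA, if_neg hlen, hh, if_true, hrep]
      have := ih g (n + 1) (slot_num + 1) (by omega)
      push_cast at this
      simp only [List.foldl_cons, rleStepB, hpos, true_and, if_true]
      rw [this]
      push_cast
      ring_nf
    · have hne : ¬ (0 < (n : Int) ∧ some g = some v) := by
        rintro ⟨-, h⟩; exact hg (Option.some.inj h)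
      have hlen' : ¬ n ≤ 0 := by omega
      simp only [checkGoA, List.length_replicate, if_neg hlen', hh, if_neg hg,
        List.foldl_cons, rleStepB, if_neg hne, if_pos hpos, Option.getD_some,
        List.nil_append]
      rw [rle_append rest [(v, (n : Int))] g 1 (by omega)]
      by_cases h3 : 3 ≤ n
      · have h3i : (3 : Int) ≤ (n : Int) := by exact_mod_cast h3
        simp only [if_pos h3, finishA, List.length_replicate, hh, List.cons_append,
          List.nil_append, scanRunsB, if_pos h3i]
        by_cases h5 : v = 5
        · simp [h3, h5]
        · have : slot_num - (n : Int) + (n : Int) = slot_num := by ring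
          simp [h3, h5, this]
      · have h3i : ¬ (3 : Int) ≤ (n : Int) := by exact_mod_cast h3
        simp only [if_neg h3]
        have hone : [g] = List.replicate 1 g := by simp
        rw [hone, ih g 1 (slot_num + 1) (by omega)]
        simp only [List.cons_append, List.nil_append, scanRunsB, if_neg h3i, Nat.cast_one]
        have harg : slot_num + 1 - 1 = slot_num - (n : Int) + (n : Int) := by ring
        rw [harg]

-- ===== VERDICT (by name: the statement is the Claim_ definition above) =====
theorem check_banishable_spec : Claim_equal_check_banishable := by
  intro gems_slot _
  unfold Spec_check_banishable check_banishable check_banishable_alt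
  cases gems_slot with
  | nil => simp [checkGoA, rleFlushB, scanRunsB, finishA]
  | cons g rest =>
    have h0 : checkGoA (g :: rest) 0 [] = checkGoA rest 1 (List.replicate 1 g) := by
      simp [checkGoA]
    have hstep : (g :: rest).foldl rleStepB ([], none, 0)
        = rest.foldl rleStepB ([], some g, 1) := by
      simp [rleStepB]
    have := main_inv rest g 1 1 (le_refl 1)
    simp only [Nat.cast_one] at this
    have hfin : finishA (checkGoA rest 1 (List.replicate 1 g))
        = scanRunsB (rleFlushB (rest.foldl rleStepB ([], some g, 1))) 0 := by
      simpa using this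
    simp only [h0, hstep]
    simpa [finishA] using hfin
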